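-- pv_equiv track=rewrite | github.com/Kurler3/py_express | tests/test_route_checker.py | _check_route_match
-- ===== SOURCE A (Python) =====
-- def _check_route_match(route, path):
--     # Split both the route and the path by /
--     route_split = route.split('/')
--     path_split = path.split('/')
--
--     if len(route_split) != len(path_split):
--         return False
--
--     for i in range(len(route_split)):
--         if route_split[i].startswith(':') and path_split[i] != '':
--             continue
--
--         if route_split[i] != path_split[i]:
--             return False
--
--     return True
-- ===== SOURCE B (Python) =====
-- def _check_route_match(route, path):
--     # Recursively consume the two segment lists in parallel; a length
--     # mismatch surfaces as one list running out before the other.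
--     def go(rs, ps):
--         if not rs and not ps:
--             return True
--         if not rs or not ps:
--             return False
--         r, p = rs[0], ps[0]
--         if (r.startswith(':') and p != '') or r == p:
--             return go(rs[1:], ps[1:])
--         return False
--     return go(route.split('/'), path.split('/'))
-- ===== Notes on version B (the rewrite author's own statement) =====
-- stated objective: alternative
-- what changed: Replaces the upfront length check plus index loop over range(len) with a single recursion that consumes both segment lists in parallel, detecting length mismatch when one list empties first and merging the two branch tests into one match condition.
import Mathlib
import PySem

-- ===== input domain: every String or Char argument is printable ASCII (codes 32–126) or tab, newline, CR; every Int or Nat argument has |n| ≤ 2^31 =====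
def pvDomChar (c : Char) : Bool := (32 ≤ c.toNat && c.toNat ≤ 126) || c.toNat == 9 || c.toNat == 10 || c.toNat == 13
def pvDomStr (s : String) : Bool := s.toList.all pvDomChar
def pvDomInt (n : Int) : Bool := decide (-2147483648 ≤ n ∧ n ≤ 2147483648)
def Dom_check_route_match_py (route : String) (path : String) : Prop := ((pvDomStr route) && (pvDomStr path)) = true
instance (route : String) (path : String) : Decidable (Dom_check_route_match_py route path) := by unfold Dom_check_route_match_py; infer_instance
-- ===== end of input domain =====

-- B replaces A's length check plus index loop with one parallel recursion over the two
-- segment lists (objective: alternative decomposition, same cost).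

-- ===== PORT A =====
-- A: split both strings on '/', compare lengths, then loop i over range(len) with
-- the ':'-parameter test first and the literal-equality test second.
def check_route_match_py (route : String) (path : String) : Bool :=
  let route_split := (PySem.Str.split? route "/").getD []
  let path_split := (PySem.Str.split? path "/").getD []
  if route_split.length ≠ path_split.length then false
  else
    (List.range route_split.length).all (fun i =>
      if PySem.Str.startswith (route_split.getD i "") ":" && !(path_split.getD i "" == "") then
        true
      else
        route_split.getD i "" == path_split.getD i "")

-- ===== PORT B =====
-- B: recursive helper consuming both segment lists in parallel (go in Source B).
def matchSegs : List String → List String → Bool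
  | [], [] => true
  | [], _ :: _ => false
  | _ :: _, [] => false
  | r :: rs, p :: ps =>
    if (PySem.Str.startswith r ":" && !(p == "")) || r == p then matchSegs rs ps
    else false

def check_route_match_py_alt (route : String) (path : String) : Bool :=
  matchSegs ((PySem.Str.split? route "/").getD []) ((PySem.Str.split? path "/").getD [])

-- ===== PRECONDITION & SPEC =====
def Spec_check_route_match_py (route : String) (path : String) (out : Bool) : Prop := out = check_route_match_py_alt route path
instance (route : String) (path : String) (out : Bool) : Decidable (Spec_check_route_match_py route path out) := by unfold Spec_check_route_match_py; infer_instance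

-- ===== CLAIM (what is proved, stated in full; the proofs are below) =====
def Claim_equal_check_route_match_py : Prop := ∀ (route : String) (path : String), Dom_check_route_match_py route path → Spec_check_route_match_py route path (check_route_match_py route path)

-- ===== LEMMAS AND PROOFS =====

-- A length mismatch makes B's recursion return false (one list empties first).
lemma matchSegs_len_ne (rs ps : List String) (h : rs.length ≠ ps.length) :
    matchSegs rs ps = false := by
  induction rs generalizing ps with
  | nil => cases ps with
    | nil => simp at h
    | cons p ps => simp [matchSegs]
  | cons r rs ih =>
    cases ps with
    | nil => simp [matchSegs]
    | cons p ps =>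
      simp only [matchSegs]
      split
      · exact ih ps (by simpa using h)
      · rfl

-- With equal lengths, A's indexed pass equals B's parallel recursion.
lemma range_all_eq_matchSegs (rs ps : List String) (h : rs.length = ps.length) :
    (List.range rs.length).all (fun i =>
      if PySem.Str.startswith (rs.getD i "") ":" && !(ps.getD i "" == "") then true
      else rs.getD i "" == ps.getD i "") = matchSegs rs ps := by
  induction rs generalizing ps with
  | nil =>
    cases ps with
    | nil => simp [matchSegs]
    | cons p ps => simp at h
  | cons r rs ih =>
    cases ps with
    | nil => simp at h
    | cons p ps =>
      have h' : rs.length = ps.length := by simpa using h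
      simp only [List.length_cons, List.range_succ_eq_map, List.all_cons, List.all_map,
        Function.comp_def, List.getD_cons_zero, List.getD_cons_succ, matchSegs]
      rw [ih ps h']
      cases hc : (PySem.Str.startswith r ":" && !(p == "")) <;> cases he : (r == p) <;> simp

-- ===== VERDICT (by name: the statement is the Claim_ definition above) =====
theorem check_route_match_py_spec : Claim_equal_check_route_match_py := by
  intro route path _
  unfold Spec_check_route_match_py check_route_match_py check_route_match_py_alt
  by_cases h : ((PySem.Str.split? route "/").getD []).length = ((PySem.Str.split? path "/").getD []).length
  · rw [if_neg (not_not_intro h)]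
    exact range_all_eq_matchSegs _ _ h
  · rw [if_pos h]
    exact (matchSegs_len_ne _ _ h).symm
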